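-- pv_equiv track=rewrite | github.com/ssoad/Competitive-Programming-Playground | Codeforces/A_Angry_Students.py | solve
-- ===== SOURCE A (Python) =====
-- def solve(n, stds):
--
--     an_index = -1
--     p_cnt = 0
--     max_p_cnt = 0
--
--     for i in range(n):
--
--         if stds[i] == 'A':
--             an_index = i
--             p_cnt = 0
--         elif an_index != -1:
--             p_cnt += 1
--
--         max_p_cnt = max(p_cnt, max_p_cnt)
--
--     return max_p_cnt
-- ===== SOURCE B (Python) =====
-- def solve(n, stds):
--     # collect positions of angry students, then the answer is the largest gap
--     # between consecutive 'A' positions (and after the last one, up to n)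
--     pos = [i for i in range(n) if stds[i] == 'A']
--     if not pos:
--         return 0
--     bounds = pos + [n]
--     return max(b - a - 1 for a, b in zip(bounds, bounds[1:]))
-- ===== Notes on version B (the rewrite author's own statement) =====
-- stated objective: simpler
-- what changed: Replaces A's stateful scan (last-A index, running counter, running max) by collecting the 'A' positions in one comprehension and returning the largest gap between consecutive positions (and after the last one, up to n).
import Mathlib
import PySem

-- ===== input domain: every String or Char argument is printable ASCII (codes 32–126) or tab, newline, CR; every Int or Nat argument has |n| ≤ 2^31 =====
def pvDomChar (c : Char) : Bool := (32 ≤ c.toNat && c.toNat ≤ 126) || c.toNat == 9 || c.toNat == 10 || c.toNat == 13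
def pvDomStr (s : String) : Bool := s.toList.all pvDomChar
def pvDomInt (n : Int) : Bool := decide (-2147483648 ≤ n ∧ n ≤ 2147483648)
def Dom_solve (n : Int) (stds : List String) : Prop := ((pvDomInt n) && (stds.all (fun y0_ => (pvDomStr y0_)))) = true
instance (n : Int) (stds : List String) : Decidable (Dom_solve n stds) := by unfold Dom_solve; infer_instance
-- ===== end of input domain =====

-- B replaces A's three-variable running scan by collecting the 'A' positions once and
-- taking the largest gap between consecutive positions (objective: simpler decomposition).

-- ===== PORT A =====
-- one step of A's loop body: state = (an_index, p_cnt, max_p_cnt)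
def pvStepA (stds : List String) (st : Int × Int × Int) (i : Int) : Int × Int × Int :=
  let st1 :=
    if ((PySem.List.pyGet? stds i).getD "" == "A") then (i, (0 : Int), st.2.2)
    else if st.1 ≠ -1 then (st.1, st.2.1 + 1, st.2.2)
    else st
  (st1.1, st1.2.1, max st1.2.1 st1.2.2)

def solve (n : Int) (stds : List String) : Int :=
  ((PySem.List.pyRange 0 n 1).foldl (pvStepA stds) (-1, 0, 0)).2.2

-- ===== PORT B =====
-- max(b - a - 1 for a, b in zip(bounds, bounds[1:]))
def pvGmax (bs : List Int) : Int :=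
  match (bs.zip bs.tail).map (fun p => p.2 - p.1 - 1) with
  | [] => 0
  | g :: gs => gs.foldl max g

def solve_alt (n : Int) (stds : List String) : Int :=
  let pos := (PySem.List.pyRange 0 n 1).filter
    (fun i => ((PySem.List.pyGet? stds i).getD "" == "A"))
  match pos with
  | [] => 0
  | _ :: _ => pvGmax (pos ++ [n])

-- ===== PRECONDITION & SPEC =====
-- Python A raises IndexError when n exceeds len(stds); it returns on every other input.
def Pre_solve (n : Int) (stds : List String) : Prop := n ≤ (stds.length : Int)
instance (n : Int) (stds : List String) : Decidable (Pre_solve n stds) := by unfold Pre_solve; infer_instance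
def pvWitness_solve : Int × List String := (3, ["A", "P", "P"])

def Spec_solve (n : Int) (stds : List String) (out : Int) : Prop := out = solve_alt n stds
instance (n : Int) (stds : List String) (out : Int) : Decidable (Spec_solve n stds out) := by unfold Spec_solve; infer_instance

-- ===== CLAIM (what is proved, stated in full; the proofs are below) =====
def Claim_equal_solve : Prop := ∀ (n : Int) (stds : List String), Dom_solve n stds → Pre_solve n stds → Spec_solve n stds (solve n stds)

-- ===== LEMMAS AND PROOFS =====

def pvFlag (stds : List String) (i : Int) : Bool := ((PySem.List.pyGet? stds i).getD "" == "A")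

-- "max pacifist run" spec: p = current run length, over remaining indices
def pvM (stds : List String) (p : Int) : List Int → Int
  | [] => p
  | i :: is => if pvFlag stds i then max p (pvM stds 0 is) else pvM stds (p + 1) is

def pvPre (stds : List String) : List Int → Int
  | [] => 0
  | i :: is => if pvFlag stds i then pvM stds 0 is else pvPre stds is

theorem pvM_ge (stds : List String) : ∀ (is : List Int) (p : Int), p ≤ pvM stds p is := by
  intro is
  induction is with
  | nil => intro p; simp [pvM]
  | cons i is ih =>
    intro p
    simp only [pvM]
    split
    · exact le_max_left _ _
    · exact le_trans (by omega) (ih (p + 1))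

theorem pvFoldlMaxInit : ∀ (l : List Int) (a b : Int), l.foldl max (max a b) = max a (l.foldl max b) := by
  intro l
  induction l with
  | nil => intro a b; simp
  | cons c l ih =>
    intro a b
    simp only [List.foldl_cons]
    rw [max_assoc, ih]

theorem pvGmax_cons (a b : Int) (l : List Int) (hl : l ≠ []) :
    pvGmax (a :: b :: l) = max (b - a - 1) (pvGmax (b :: l)) := by
  cases l with
  | nil => exact absurd rfl hl
  | cons c l' =>
    simp only [pvGmax, List.zip, List.tail, List.zipWith, List.map]
    rw [List.foldl_cons, pvFoldlMaxInit]

theorem pvGmax_pair (a b : Int) : pvGmax [a, b] = b - a - 1 := by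
  simp [pvGmax, List.zip]

theorem pvFoldA_seen (stds : List String) :
    ∀ (is : List Int) (an p m : Int), an ≠ -1 → (∀ i ∈ is, 0 ≤ i) → 0 ≤ p → p ≤ m →
      ((is.foldl (pvStepA stds) (an, p, m)).2.2) = max m (pvM stds p is) := by
  intro is
  induction is with
  | nil =>
    intro an p m _ _ _ hpm
    simp [pvM]
    omega
  | cons i is ih =>
    intro an p m han hmem hp hpm
    have hi : (0 : Int) ≤ i := hmem i (List.mem_cons_self ..)
    have hmem' : ∀ j ∈ is, (0 : Int) ≤ j := fun j hj => hmem j (List.mem_cons_of_mem _ hj)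
    simp only [List.foldl_cons, pvStepA, pvFlag, pvM]
    by_cases hf : ((PySem.List.pyGet? stds i).getD "" == "A") = true
    · rw [if_pos hf, if_pos hf]
      rw [show (max (0 : Int) m) = m by omega]
      rw [ih i 0 m (by omega) hmem' le_rfl (by omega)]
      omega
    · rw [if_neg hf, if_neg hf, if_pos han]
      have := pvM_ge stds is (p + 1)
      rw [ih an (p + 1) (max (p + 1) m) han hmem' (by omega) (le_max_left _ _)]
      omega

theorem pvFoldA_pre (stds : List String) :
    ∀ (is : List Int), (∀ i ∈ is, 0 ≤ i) →
      ((is.foldl (pvStepA stds) (-1, 0, 0)).2.2) = pvPre stds is := by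
  intro is
  induction is with
  | nil => intro _; simp [pvPre]
  | cons i is ih =>
    intro hmem
    have hi : (0 : Int) ≤ i := hmem i (List.mem_cons_self ..)
    have hmem' : ∀ j ∈ is, (0 : Int) ≤ j := fun j hj => hmem j (List.mem_cons_of_mem _ hj)
    simp only [List.foldl_cons, pvStepA, pvFlag, pvPre]
    by_cases hf : ((PySem.List.pyGet? stds i).getD "" == "A") = true
    · rw [if_pos hf, if_pos hf]
      have := pvM_ge stds is 0
      rw [show (max (0 : Int) 0) = 0 from rfl]
      rw [pvFoldA_seen stds is i 0 0 (by omega) hmem' le_rfl le_rfl]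
      omega
    · rw [if_neg hf, if_neg hf, if_neg (by simp)]
      exact ih hmem'

theorem pvGmaxG (stds : List String) (n : Int) :
    ∀ (k : Nat) (j j0 p : Int), 0 ≤ p → j0 = j - p - 1 → j ≤ n → (n - j).toNat = k →
      pvGmax (j0 :: (PySem.List.pyRange j n 1).filter (pvFlag stds) ++ [n]) =
        pvM stds p (PySem.List.pyRange j n 1) := by
  intro k
  induction k with
  | zero =>
    intro j j0 p hp hj0 hjn hk
    have hj : j = n := by omega
    subst hj
    rw [PySem.List.pyRange_one_eq_nil le_rfl]
    simp only [List.filter_nil, pvM]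
    rw [show (j0 :: ([] : List Int)) ++ [j] = [j0, j] from rfl] at *
    rw [pvGmax_pair]
    omega
  | succ k ih =>
    intro j j0 p hp hj0 hjn hk
    have hjlt : j < n := by omega
    rw [PySem.List.pyRange_one_cons hjlt]
    simp only [List.filter_cons, pvM]
    by_cases hf : pvFlag stds j = true
    · simp only [hf, if_true, List.cons_append]
      rw [pvGmax_cons j0 j _ (by simp)]
      have hih := ih (j + 1) j 0 le_rfl (by omega) (by omega) (by omega)
      rw [List.cons_append] at hih
      rw [hih]
      omega
    · simp only [hf, Bool.false_eq_true, if_false]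
      exact ih (j + 1) j0 (p + 1) (by omega) (by omega) (by omega) (by omega)

theorem pvAltB (stds : List String) (n : Int) :
    ∀ (k : Nat) (j : Int), j ≤ n → (n - j).toNat = k →
      (match (PySem.List.pyRange j n 1).filter (pvFlag stds) with
       | [] => (0 : Int)
       | _ :: _ => pvGmax (((PySem.List.pyRange j n 1).filter (pvFlag stds)) ++ [n])) =
        pvPre stds (PySem.List.pyRange j n 1) := by
  intro k
  induction k with
  | zero =>
    intro j hjn hk
    have hj : j = n := by omega
    subst hj
    rw [PySem.List.pyRange_one_eq_nil le_rfl]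
    simp [pvPre]
  | succ k ih =>
    intro j hjn hk
    have hjlt : j < n := by omega
    rw [PySem.List.pyRange_one_cons hjlt]
    simp only [List.filter_cons, pvPre]
    by_cases hf : pvFlag stds j = true
    · simp only [hf, if_true]
      exact pvGmaxG stds n k (j + 1) j 0 le_rfl (by omega) (by omega) (by omega)
    · simp only [hf, Bool.false_eq_true, if_false]
      exact ih (j + 1) (by omega) (by omega)

theorem pvMain (n : Int) (stds : List String) : solve n stds = solve_alt n stds := by
  unfold solve solve_alt
  by_cases hn : n ≤ 0
  · rw [PySem.List.pyRange_one_eq_nil hn]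
    simp
  · have h0n : (0 : Int) ≤ n := by omega
    have hmem : ∀ i ∈ PySem.List.pyRange 0 n 1, (0 : Int) ≤ i := by
      intro i hi
      exact ((PySem.List.mem_pyRange_one).1 hi).1
    rw [pvFoldA_pre stds _ hmem]
    have hfilter : (PySem.List.pyRange 0 n 1).filter
        (fun i => ((PySem.List.pyGet? stds i).getD "" == "A")) =
        (PySem.List.pyRange 0 n 1).filter (pvFlag stds) := rfl
    simp only [hfilter]
    exact (pvAltB stds n (n - 0).toNat 0 h0n rfl).symm

-- ===== VERDICT (by name: the statement is the Claim_ definition above) =====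
theorem solve_spec : Claim_equal_solve := by
  intro n stds _ _
  unfold Spec_solve
  exact pvMain n stds
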